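-- pv_equiv track=rewrite | github.com/Clavss/AdventofCode | src/year2022/day06/main.py | last_repeated_index
-- ===== SOURCE A (Python) =====
-- def last_repeated_index(substring: str) -> int:
--     save = {}
--     substring = substring[::-1]  # reverse the string
--     for index, char in enumerate(substring):
--         if save.get(char) is None:
--             save[char] = index
--         else:
--             return len(substring) - index
--     return -1
-- ===== SOURCE B (Python) =====
-- def last_repeated_index(substring: str) -> int:
--     best = -1
--     for i, c in enumerate(substring):
--         if c in substring[i + 1:]:
--             best = i
--     return best + 1 if best >= 0 else -1
-- ===== Notes on version B (the rewrite author's own statement) =====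
-- stated objective: simpler
-- what changed: Instead of reversing the string and scanning with a seen-dict that early-returns on the first repeat, B scans forward once and keeps the last index whose character reappears in the remaining suffix, returning that index plus one (or -1).
import Mathlib
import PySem

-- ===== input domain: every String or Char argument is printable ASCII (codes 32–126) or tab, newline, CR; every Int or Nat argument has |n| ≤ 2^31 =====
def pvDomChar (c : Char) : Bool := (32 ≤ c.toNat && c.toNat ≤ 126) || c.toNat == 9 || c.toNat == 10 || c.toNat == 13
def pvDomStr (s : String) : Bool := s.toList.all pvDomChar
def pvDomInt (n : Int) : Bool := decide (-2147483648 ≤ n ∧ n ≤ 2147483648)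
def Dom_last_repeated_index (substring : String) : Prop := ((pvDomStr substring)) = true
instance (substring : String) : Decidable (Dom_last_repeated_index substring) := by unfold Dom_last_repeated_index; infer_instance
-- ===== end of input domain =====

-- B replaces A's reverse-and-seen-dict early-exit scan by a plain forward scan keeping the last
-- index whose character reappears in the remaining suffix (objective: simpler; not faster).

-- ===== PORT A =====
-- the for-loop over enumerate(reversed string) with early return, carrying the dict `save`
def lriA_loop (n : Int) : List Char → Int → PySem.Dict Char Int → Int
  | [], _, _ => -1
  | char :: rest, index, save =>
    match save.get? char with
    | none => lriA_loop n rest (index + 1) (save.insert char index)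
    | some _ => n - index

def last_repeated_index (substring : String) : Int :=
  -- substring = substring[::-1]; a step of -1 never raises (slice?_none_none_neg_one)
  let rev := (PySem.List.slice? substring.toList none none (-1)).getD []
  lriA_loop (PySem.List.len rev) rev 0 PySem.Dict.empty

-- ===== PORT B =====
def last_repeated_index_alt (substring : String) : Int :=
  let cs := substring.toList
  let best := (PySem.List.enumerate cs 0).foldl
    (fun b p => if p.2 ∈ PySem.List.slice cs (some (p.1 + 1)) none then p.1 else b) (-1 : Int)
  if best ≥ 0 then best + 1 else -1

-- ===== PRECONDITION & SPEC =====
def Spec_last_repeated_index (substring : String) (out : Int) : Prop := out = last_repeated_index_alt substring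
instance (substring : String) (out : Int) : Decidable (Spec_last_repeated_index substring out) := by unfold Spec_last_repeated_index; infer_instance

-- ===== CLAIM (what is proved, stated in full; the proofs are below) =====
def Claim_equal_last_repeated_index : Prop := ∀ (substring : String), Dom_last_repeated_index substring → Spec_last_repeated_index substring (last_repeated_index substring)

-- ===== LEMMAS AND PROOFS =====

-- proof-side reference: index (counting from the front) of the first element that already
-- occurred before it (`seen` = elements before the scanned part)
def frep : List Char → List Char → Option Nat
  | _, [] => none
  | seen, c :: rest => if c ∈ seen then some 0 else (frep (seen ++ [c]) rest).map (· + 1)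

theorem lriA_loop_eq_frep (rest : List Char) : ∀ (n index : Int) (save : PySem.Dict Char Int)
    (seen : List Char), (∀ c, save.get? c = none ↔ c ∉ seen) →
    lriA_loop n rest index save =
      (match frep seen rest with
       | some k => n - (index + (k : Int))
       | none => -1) := by
  induction rest with
  | nil => intro n index save seen hinv; rfl
  | cons c rest ih =>
    intro n index save seen hinv
    by_cases hc : c ∈ seen
    · cases hg : save.get? c with
      | none => exact absurd ((hinv c).mp hg) (by simpa using hc)
      | some v =>
        simp only [lriA_loop, hg, frep, if_pos hc]
        push_cast
        ring
    · have hg : save.get? c = none := (hinv c).mpr hc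
      simp only [lriA_loop, hg, frep, if_neg hc]
      rw [ih n (index + 1) (save.insert c index) (seen ++ [c]) ?_]
      · cases hf : frep (seen ++ [c]) rest with
        | none => simp
        | some k => simp; omega
      · intro c'
        rw [PySem.Dict.get?_insert]
        constructor
        · intro h
          by_cases h' : c' = c
          · simp [h'] at h
          · simp [h'] at h
            simp [h', (hinv c').mp h]
        · intro h
          have h1 : ¬ c' = c := by simp at h; tauto
          have h2 : c' ∉ seen := by simp at h; tauto
          simp [h1, (hinv c').mpr h2]

theorem frep_none_iff (rest : List Char) : ∀ (seen : List Char),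
    frep seen rest = none ↔ ∀ (k : Nat) (h : k < rest.length), rest[k] ∉ seen ++ rest.take k := by
  induction rest with
  | nil => intro seen; simp [frep]
  | cons c rest ih =>
    intro seen
    by_cases hc : c ∈ seen
    · simp only [frep, if_pos hc]
      constructor
      · intro h; exact absurd h (by simp)
      · intro h
        exact absurd (by simpa using h 0 (by simp)) (by simp [hc])
    · simp only [frep, if_neg hc, Option.map_eq_none_iff, ih (seen ++ [c])]
      constructor
      · intro h k hk
        match k with
        | 0 => simpa using hc
        | j + 1 =>
          have := h j (by simpa using hk)
          simp only [List.getElem_cons_succ, List.take_succ_cons]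
          simp only [List.mem_append, List.mem_cons] at this ⊢
          tauto
      · intro h j hj
        have := h (j + 1) (by simpa using hj)
        simp only [List.getElem_cons_succ, List.take_succ_cons] at this
        simp only [List.mem_append, List.mem_cons] at this ⊢
        tauto

theorem frep_some (rest : List Char) : ∀ (seen : List Char) (k : Nat),
    frep seen rest = some k →
    ∃ h : k < rest.length, rest[k] ∈ seen ++ rest.take k ∧
      ∀ (j : Nat) (hj : j < k), rest[j] ∉ seen ++ rest.take j := by
  induction rest with
  | nil => intro seen k h; simp [frep] at h
  | cons c rest ih =>
    intro seen k h
    by_cases hc : c ∈ seen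
    · simp only [frep, if_pos hc, Option.some.injEq] at h
      subst h
      exact ⟨by simp, by simpa using hc, by omega⟩
    · simp only [frep, if_neg hc] at h
      cases hf : frep (seen ++ [c]) rest with
      | none => rw [hf] at h; simp at h
      | some k' =>
        rw [hf] at h; simp only [Option.map_some, Option.some.injEq] at h
        obtain ⟨hlt, hmem, hmin⟩ := ih (seen ++ [c]) k' hf
        subst h
        refine ⟨by simpa using Nat.succ_lt_succ hlt, ?_, ?_⟩
        · simp only [List.getElem_cons_succ, List.take_succ_cons]
          simp only [List.mem_append, List.mem_cons] at hmem ⊢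
          tauto
        · intro j hj
          match j with
          | 0 => simpa using hc
          | i + 1 =>
            have := hmin i (by omega)
            simp only [List.getElem_cons_succ, List.take_succ_cons]
            simp only [List.mem_append, List.mem_cons] at this ⊢
            tauto

theorem fold_best_none {P : Int × Char → Prop} [DecidablePred P] (l : List (Int × Char))
    (b0 : Int) (h : ∀ p ∈ l, ¬ P p) :
    l.foldl (fun b p => if P p then p.1 else b) b0 = b0 := by
  induction l generalizing b0 with
  | nil => rfl
  | cons p l ih =>
    simp only [List.foldl_cons, if_neg (h p (by simp))]
    exact ih b0 (fun q hq => h q (by simp [hq]))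

theorem fold_best_last {P : Int × Char → Prop} [DecidablePred P] (l1 l2 : List (Int × Char))
    (p : Int × Char) (b0 : Int) (hp : P p) (h2 : ∀ q ∈ l2, ¬ P q) :
    (l1 ++ p :: l2).foldl (fun b p => if P p then p.1 else b) b0 = p.1 := by
  rw [List.foldl_append, List.foldl_cons, if_pos hp]
  exact fold_best_none l2 p.1 h2

-- translating B's slice test into a drop, and a cs-index condition into the reverse-index one
theorem P_iff (cs : List Char) (m : Nat) (hm : m < cs.length) :
    (cs[m] ∈ PySem.List.slice cs (some ((m : Int) + 1)) none) ↔ cs[m] ∈ cs.drop (m + 1) := by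
  have h : ((m : Int) + 1) = ((m + 1 : Nat) : Int) := by push_cast; ring
  rw [h, PySem.List.slice_from_natCast]

theorem arith_best (cs : List Char) (k m : Nat) (hkn : k < cs.length) (hm : m = cs.length - 1 - k) :
    (↑cs.length : Int) - (0 + ↑k) = ↑m + 1 := by omega

theorem cond_bridge (cs : List Char) (k : Nat) (hk : k < cs.length) :
    (cs[cs.length - 1 - k]'(by omega) ∈ cs.drop (cs.length - 1 - k + 1)) ↔
    (cs.reverse[k]'(by simpa using hk) ∈ cs.reverse.take k) := by
  have h1 : cs.length - 1 - k + 1 = cs.length - k := by omega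
  rw [h1, List.take_reverse, List.mem_reverse, List.getElem_reverse]

theorem main_eq (s : String) : last_repeated_index s = last_repeated_index_alt s := by
  unfold last_repeated_index last_repeated_index_alt
  rw [PySem.List.slice?_none_none_neg_one]
  simp only [Option.getD_some]
  set cs := s.toList with hcs
  clear_value cs
  rw [lriA_loop_eq_frep cs.reverse (PySem.List.len cs.reverse) 0 PySem.Dict.empty []
      (by intro c; simp [PySem.Dict.get?_empty])]
  have hlen : PySem.List.len cs.reverse = (cs.length : Int) := by
    simp [PySem.List.len_eq]
  cases hf : frep [] cs.reverse with
  | none =>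
    have hnone := (frep_none_iff cs.reverse []).mp hf
    rw [fold_best_none (P := fun p => p.2 ∈ PySem.List.slice cs (some (p.1 + 1)) none) _ _ ?_]
    · norm_num
    · intro p hp hP
      rw [PySem.List.mem_enumerate_iff] at hp
      obtain ⟨m, hm, rfl⟩ := hp
      simp only [zero_add] at hP
      have hQ : cs[m] ∈ cs.drop (m + 1) := (P_iff cs m hm).mp hP
      have hk : cs.length - 1 - m < cs.reverse.length := by simp; omega
      have h1 : cs.length - 1 - (cs.length - 1 - m) = m := by omega
      have := hnone (cs.length - 1 - m) hk
      rw [List.nil_append] at this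
      exact this (by
        rw [← cond_bridge cs (cs.length - 1 - m) (by omega)]
        simp only [h1]
        exact hQ)
  | some k =>
    obtain ⟨hk, hmem, hmin⟩ := frep_some cs.reverse [] k hf
    have hkn : k < cs.length := by simpa using hk
    set n := cs.length with hn
    set m := n - 1 - k with hm
    have hmn : m < n := by omega
    clear_value n m
    subst hn
    have hdec : PySem.List.enumerate cs 0 =
        PySem.List.enumerate (cs.take m) 0 ++
          ((m : Int), cs[m]'(by omega)) :: PySem.List.enumerate (cs.drop (m + 1)) ((m : Int) + 1) := by
      conv_lhs => rw [← List.take_append_drop m cs, List.drop_eq_getElem_cons (by omega)]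
      rw [PySem.List.enumerate_append, PySem.List.enumerate_cons]
      have : (cs.take m).length = m := by simp; omega
      rw [this]
      norm_num
    rw [hdec, fold_best_last (P := fun p => p.2 ∈ PySem.List.slice cs (some (p.1 + 1)) none)
        _ _ _ _ ?_ ?_]
    · rw [hlen]
      have hge : ((m : Int)) ≥ 0 := by positivity
      rw [if_pos hge]
      exact arith_best cs k m hkn hm
    · -- P holds at (m, cs[m])
      show cs[m]'(by omega) ∈ PySem.List.slice cs (some ((m : Int) + 1)) none
      rw [P_iff cs m (by omega)]
      rw [List.nil_append] at hmem
      have hcb := (cond_bridge cs k (by omega : k < cs.length)).mpr hmem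
      have h4 : cs.length - 1 - k = m := by omega
      simp only [h4] at hcb
      exact hcb
    · -- no later index qualifies
      intro q hq hP
      rw [PySem.List.mem_enumerate_iff] at hq
      obtain ⟨j, hj, rfl⟩ := hq
      have hjd : (cs.drop (m + 1))[j] = cs[m + 1 + j]'(by simp at hj; omega) := by
        rw [List.getElem_drop]
      have hidx : ((m : Int) + 1 + (j : Int)) = ((m + 1 + j : Nat) : Int) := by push_cast; ring
      have hmj : m + 1 + j < cs.length := by simp at hj; omega
      simp only [hjd, hidx] at hP
      have hQ : cs[m + 1 + j]'(by omega) ∈ cs.drop (m + 1 + j + 1) := (P_iff cs (m + 1 + j) (by omega : m + 1 + j < cs.length)).mp hP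
      -- translate to a reverse-index smaller than k and contradict minimality
      have hk' : cs.length - 1 - (m + 1 + j) < k := by omega
      have := hmin (cs.length - 1 - (m + 1 + j)) hk'
      rw [List.nil_append] at this
      exact this (by
        rw [← cond_bridge cs (cs.length - 1 - (m + 1 + j)) (by omega)]
        have h1 : cs.length - 1 - (cs.length - 1 - (m + 1 + j)) = m + 1 + j := by omega
        simp only [h1]
        exact hQ)

-- ===== VERDICT (by name: the statement is the Claim_ definition above) =====
theorem last_repeated_index_spec : Claim_equal_last_repeated_index := by
  intro s _
  unfold Spec_last_repeated_index
  exact main_eq s
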